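-- pv_equiv track=rewrite | github.com/scikit-learn/scikit-learn | venv/lib/python3.5/site-packages/prompt_toolkit/styles/utils.py | split_token_in_parts
-- ===== SOURCE A (Python) =====
-- def split_token_in_parts(token):
--     """
--     Take a Token, and turn it in a list of tokens, by splitting
--     it on ':' (taking that as a separator.)
--     """
--     result = []
--     current = []
--     for part in token + (':', ):
--         if part == ':':
--             if current:
--                 result.append(tuple(current))
--                 current = []
--         else:
--             current.append(part)
--
--     return result
-- ===== SOURCE B (Python) =====
-- def split_token_in_parts(token):
--     """
--     Take a Token, and turn it in a list of tokens, by splitting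
--     it on ':' (taking that as a separator.)
--     """
--     result = []
--     i, n = 0, len(token)
--     while i < n:
--         if token[i] == ':':
--             i += 1
--         else:
--             j = i
--             while j < n and token[j] != ':':
--                 j += 1
--             result.append(tuple(token[i:j]))
--             i = j
--     return result
-- ===== Notes on version B (the rewrite author's own statement) =====
-- stated objective: alternative
-- what changed: B scans maximal non-':' runs with an inner index loop and slices each run out directly, instead of A's element-by-element accumulator with a trailing colon sentinel appended to the input to flush the last group.
import Mathlib
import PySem

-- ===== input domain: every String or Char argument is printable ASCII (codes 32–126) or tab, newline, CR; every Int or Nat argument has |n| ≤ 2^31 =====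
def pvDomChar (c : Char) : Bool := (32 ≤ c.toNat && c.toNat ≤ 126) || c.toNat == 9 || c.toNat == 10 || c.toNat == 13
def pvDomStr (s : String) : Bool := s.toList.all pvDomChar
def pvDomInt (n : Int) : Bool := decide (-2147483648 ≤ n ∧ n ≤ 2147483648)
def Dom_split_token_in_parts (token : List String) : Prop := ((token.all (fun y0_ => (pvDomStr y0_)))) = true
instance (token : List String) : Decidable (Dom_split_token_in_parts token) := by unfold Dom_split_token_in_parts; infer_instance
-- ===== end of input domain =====

-- B is an alternative of the same cost: it scans maximal non-":" runs and emits each run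
-- as a slice, instead of A's per-element accumulator with a ":" flush sentinel.

-- ===== PORT A =====
-- A's for-loop over `token + (':',)` with state (result, current), branches in source order.
def pvALoop : List String → List (List String) → List String → List (List String) × List String
  | [], res, cur => (res, cur)
  | p :: ps, res, cur =>
    if p = ":" then
      if cur ≠ [] then pvALoop ps (res ++ [cur]) []
      else pvALoop ps res cur
    else pvALoop ps res (cur ++ [p])

def split_token_in_parts (token : List String) : List (List String) :=
  (pvALoop (token ++ [":"]) [] []).1

-- ===== PORT B =====
-- inner `while j < n and token[j] != ':'` scan: returns (the run token[i:j], the rest)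
def pvRunScan : List String → List String × List String
  | [] => ([], [])
  | x :: xs =>
    if x = ":" then ([], x :: xs)
    else
      let (r, rest) := pvRunScan xs
      (x :: r, rest)

theorem pvRunScan_snd_le : ∀ (l : List String), (pvRunScan l).2.length ≤ l.length
  | [] => Nat.le_refl _
  | x :: xs => by
    simp only [pvRunScan]
    split
    · simp
    · have := pvRunScan_snd_le xs
      simpa using Nat.le_succ_of_le this

-- B's outer while loop: skip separators, otherwise emit the maximal run and continue after it.
def split_token_in_parts_alt : List String → List (List String)
  | [] => []
  | x :: xs =>
    if x = ":" then split_token_in_parts_alt xs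
    else
      (x :: (pvRunScan xs).1) :: split_token_in_parts_alt (pvRunScan xs).2
termination_by l => l.length
decreasing_by
  · simp
  · exact Nat.lt_succ_of_le (pvRunScan_snd_le xs)

-- ===== PRECONDITION & SPEC =====
def Spec_split_token_in_parts (token : List String) (out : List (List String)) : Prop := out = split_token_in_parts_alt token
instance (token : List String) (out : List (List String)) : Decidable (Spec_split_token_in_parts token out) := by unfold Spec_split_token_in_parts; infer_instance

-- ===== CLAIM (what is proved, stated in full; the proofs are below) =====
def Claim_equal_split_token_in_parts : Prop := ∀ (token : List String), Dom_split_token_in_parts token → Spec_split_token_in_parts token (split_token_in_parts token)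

-- ===== LEMMAS AND PROOFS =====

-- what A's loop produces from a pending `current` and the remaining input (trailing ":" included)
def pvAltWith (cur : List String) : List String → List (List String)
  | [] => if cur = [] then [] else [cur]
  | x :: xs =>
    if x = ":" then
      if cur = [] then pvAltWith [] xs else cur :: pvAltWith [] xs
    else pvAltWith (cur ++ [x]) xs

theorem pvALoop_eq_altWith : ∀ (l : List String) (res : List (List String)) (cur : List String),
    (pvALoop (l ++ [":"]) res cur).1 = res ++ pvAltWith cur l := by
  intro l
  induction l with
  | nil =>
    intro res cur
    simp only [pvALoop, pvAltWith, List.nil_append]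
    by_cases h : cur = [] <;> simp [h]
  | cons x xs ih =>
    intro res cur
    simp only [List.cons_append, pvALoop, pvAltWith]
    by_cases hx : x = ":"
    · by_cases hc : cur = []
      · simp [hx, hc, ih]
      · simp [hx, hc, ih]
    · simp [hx, ih]

theorem pvAltWith_ne : ∀ (xs : List String) (cur : List String), cur ≠ [] →
    pvAltWith cur xs = (cur ++ (pvRunScan xs).1) :: pvAltWith [] (pvRunScan xs).2 := by
  intro xs
  induction xs with
  | nil => intro cur hc; simp [pvAltWith, pvRunScan, hc]
  | cons x xs ih =>
    intro cur hc
    by_cases hx : x = ":"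
    · simp [pvAltWith, pvRunScan, hx, hc]
    · simp only [pvAltWith, pvRunScan, hx]
      rw [ih (cur ++ [x]) (by simp)]
      simp

theorem pvAltWith_nil_eq_alt : ∀ (l : List String),
    pvAltWith [] l = split_token_in_parts_alt l := by
  intro l
  induction l using split_token_in_parts_alt.induct with
  | case1 => simp [pvAltWith, split_token_in_parts_alt]
  | case2 xs ih =>
    simpa [pvAltWith, split_token_in_parts_alt] using ih
  | case3 x xs hx ih =>
    simp only [pvAltWith, if_neg hx, split_token_in_parts_alt, List.nil_append]
    rw [pvAltWith_ne xs [x] (by simp), ih]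
    simp

theorem split_token_in_parts_spec : Claim_equal_split_token_in_parts := by
  intro token _
  unfold Spec_split_token_in_parts split_token_in_parts
  rw [pvALoop_eq_altWith, pvAltWith_nil_eq_alt]
  simp
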